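-- pv_equiv track=rewrite | github.com/dizzlizm/complens.ai.web | src/layers/shared/python/complens/services/synthesis_engine.py | _create_block_batches
-- ===== SOURCE A (Python) =====
-- def _create_block_batches(block_types: list[str]) -> list[list[str]]:
--     """Group blocks into logical batches for focused generation.
--
--     Keeps related blocks together while limiting batch size to prevent
--     AI from truncating content.
--     """
--     batches: list[list[str]] = []
--
--     # Define block groupings (related blocks generate better together)
--     block_groups = {
--         "hero": ["hero"],  # Hero alone - it's important
--         "features": ["features", "stats"],  # Often paired
--         "social_proof": ["testimonials", "logo-cloud"],
--         "conversion": ["cta", "form"],  # Conversion blocks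
--         "info": ["faq", "pricing"],  # Information blocks
--         "media": ["image", "video", "gallery", "slider"],
--         "content": ["text", "divider"],
--         "engagement": ["chat"],
--     }
--
--     # Track which blocks have been assigned
--     assigned = set()
--
--     # First pass: group related blocks
--     for group_name, group_types in block_groups.items():
--         batch = [bt for bt in block_types if bt in group_types and bt not in assigned]
--         if batch:
--             # Split large batches
--             while len(batch) > 3:
--                 batches.append(batch[:2])
--                 assigned.update(batch[:2])
--                 batch = batch[2:]
--             if batch:
--                 batches.append(batch)
--                 assigned.update(batch)
--
--     # Second pass: catch any remaining blocks
--     remaining = [bt for bt in block_types if bt not in assigned]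
--     for i in range(0, len(remaining), 2):
--         batches.append(remaining[i:i+2])
--
--     return batches
-- ===== SOURCE B (Python) =====
-- def _split(batch):
--     """Split a batch with the same peel-2-while-longer-than-3 rule."""
--     if len(batch) > 3:
--         return [batch[:2]] + _split(batch[2:])
--     return [batch] if batch else []
--
--
-- def _create_block_batches(block_types: list[str]) -> list[list[str]]:
--     block_groups = {
--         "hero": ["hero"],
--         "features": ["features", "stats"],
--         "social_proof": ["testimonials", "logo-cloud"],
--         "conversion": ["cta", "form"],
--         "info": ["faq", "pricing"],
--         "media": ["image", "video", "gallery", "slider"],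
--         "content": ["text", "divider"],
--         "engagement": ["chat"],
--     }
--     # Reverse lookup: block type -> its group name.
--     reverse = {bt: g for g, types in block_groups.items() for bt in types}
--
--     # One pass: bucket each block by its group, or collect it as remaining.
--     buckets = {g: [] for g in block_groups}
--     remaining = []
--     for bt in block_types:
--         g = reverse.get(bt)
--         if g is not None:
--             buckets[g].append(bt)
--         else:
--             remaining.append(bt)
--
--     batches = []
--     for g in block_groups:
--         if buckets[g]:
--             batches.extend(_split(buckets[g]))
--
--     for i in range(0, len(remaining), 2):
--         batches.append(remaining[i:i + 2])
--     return batches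
-- ===== Notes on version B (the rewrite author's own statement) =====
-- stated objective: alternative
-- what changed: A rescans block_types once per group with a mutating assigned-set filter; B builds a reverse block-type-to-group dict and distributes block_types into ordered per-group buckets plus a remaining list in one pass, then emits the buckets in group-definition order with a recursive split helper.
import Mathlib
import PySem

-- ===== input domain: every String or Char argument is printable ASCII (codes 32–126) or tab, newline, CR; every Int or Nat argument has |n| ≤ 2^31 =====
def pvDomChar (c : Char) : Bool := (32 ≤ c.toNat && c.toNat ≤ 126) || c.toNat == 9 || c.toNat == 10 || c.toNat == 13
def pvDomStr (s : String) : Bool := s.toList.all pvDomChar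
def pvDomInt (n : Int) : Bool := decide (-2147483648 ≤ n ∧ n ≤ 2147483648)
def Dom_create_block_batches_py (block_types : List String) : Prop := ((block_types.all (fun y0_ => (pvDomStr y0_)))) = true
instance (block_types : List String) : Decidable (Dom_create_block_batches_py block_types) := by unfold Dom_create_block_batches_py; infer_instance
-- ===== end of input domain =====

-- B replaces A's nested per-group scans by a reverse-lookup dict and one bucketing pass over
-- block_types (objective: alternative decomposition; same observable result, no mutation involved).

-- ===== PORT A =====
-- the literal block_groups dict of A, as an insertion-ordered association list
def groupsA : List (String × List String) :=
  [("hero", ["hero"]),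
   ("features", ["features", "stats"]),
   ("social_proof", ["testimonials", "logo-cloud"]),
   ("conversion", ["cta", "form"]),
   ("info", ["faq", "pricing"]),
   ("media", ["image", "video", "gallery", "slider"]),
   ("content", ["text", "divider"]),
   ("engagement", ["chat"])]

-- A's inner 'while len(batch) > 3' loop; state = (batches, assigned, batch)
def whileSplitA (batches : List (List String)) (assigned : PySem.Set String) (batch : List String) :
    List (List String) × PySem.Set String × List String :=
  if _h : batch.length > 3 then
    whileSplitA (batches ++ [PySem.List.slice batch none (some 2)])
      (PySem.Set.update assigned (PySem.List.slice batch none (some 2)))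
      (PySem.List.slice batch (some 2) none)
  else (batches, assigned, batch)
termination_by batch.length
decreasing_by rw [PySem.List.slice_some_none]; simp [PySem.List.clampIdx]; omega

-- one iteration of A's 'for group_name, group_types in block_groups.items()' loop
def stepA (block_types : List String) (st : List (List String) × PySem.Set String)
    (g : String × List String) : List (List String) × PySem.Set String :=
  let batch := block_types.filter (fun bt => g.2.contains bt && !(PySem.Set.contains st.2 bt))
  if batch.isEmpty then st
  else
    let r := whileSplitA st.1 st.2 batch
    if r.2.2.isEmpty then (r.1, r.2.1)
    else (r.1 ++ [r.2.2], PySem.Set.update r.2.1 r.2.2)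

-- the shared trailing loop 'for i in range(0, len(remaining), 2): batches.append(remaining[i:i+2])'
-- (identical source code in A and in B)
def appendPairs (batches : List (List String)) (remaining : List String) : List (List String) :=
  (PySem.List.pyRange 0 (remaining.length : Int) 2).foldl
    (fun b i => b ++ [PySem.List.slice remaining (some i) (some (i + 2))]) batches

def create_block_batches_py (block_types : List String) : List (List String) :=
  let st := groupsA.foldl (stepA block_types) ([], PySem.Set.empty)
  let remaining := block_types.filter (fun bt => !(PySem.Set.contains st.2 bt))
  appendPairs st.1 remaining

-- ===== PORT B =====
def groupsB : List (String × List String) :=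
  [("hero", ["hero"]),
   ("features", ["features", "stats"]),
   ("social_proof", ["testimonials", "logo-cloud"]),
   ("conversion", ["cta", "form"]),
   ("info", ["faq", "pricing"]),
   ("media", ["image", "video", "gallery", "slider"]),
   ("content", ["text", "divider"]),
   ("engagement", ["chat"])]

-- reverse = {bt: g for g, types in block_groups.items() for bt in types}
def reverseB : PySem.Dict String String :=
  groupsB.foldl (fun d p => p.2.foldl (fun d bt => d.insert bt p.1) d) PySem.Dict.empty

-- B's recursive _split helper
def splitB (batch : List String) : List (List String) :=
  if _h : batch.length > 3 then
    PySem.List.slice batch none (some 2) :: splitB (PySem.List.slice batch (some 2) none)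
  else if batch.isEmpty then [] else [batch]
termination_by batch.length
decreasing_by rw [PySem.List.slice_some_none]; simp [PySem.List.clampIdx]; omega

def create_block_batches_py_alt (block_types : List String) : List (List String) :=
  let buckets0 : PySem.Dict String (List String) :=
    groupsB.foldl (fun d p => d.insert p.1 []) PySem.Dict.empty
  -- single bucketing pass over block_types
  let st := block_types.foldl
    (fun (st : PySem.Dict String (List String) × List String) bt =>
      match reverseB.get? bt with
      | some g => (st.1.modify g [] (· ++ [bt]), st.2)
      | none => (st.1, st.2 ++ [bt]))
    (buckets0, [])
  -- emit the non-empty buckets in group-definition order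
  let batches := groupsB.foldl
    (fun acc p => if (st.1.getD p.1 []).isEmpty then acc else acc ++ splitB (st.1.getD p.1 [])) []
  appendPairs batches st.2

-- ===== PRECONDITION & SPEC =====
def Spec_create_block_batches_py (block_types : List String) (out : List (List String)) : Prop := out = create_block_batches_py_alt block_types
instance (block_types : List String) (out : List (List String)) : Decidable (Spec_create_block_batches_py block_types out) := by unfold Spec_create_block_batches_py; infer_instance

-- ===== CLAIM (what is proved, stated in full; the proofs are below) =====
def Claim_equal_create_block_batches_py : Prop := ∀ (block_types : List String), Dom_create_block_batches_py block_types → Spec_create_block_batches_py block_types (create_block_batches_py block_types)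

-- ===== LEMMAS AND PROOFS =====

-- abbreviation for B's bucketing step (proof-side only)
def bstep (st : PySem.Dict String (List String) × List String) (bt : String) :
    PySem.Dict String (List String) × List String :=
  match reverseB.get? bt with
  | some g => (st.1.modify g [] (· ++ [bt]), st.2)
  | none => (st.1, st.2 ++ [bt])

-- the canonical value both ports are reduced to
def canonReverse (xs : List String) : List (List String) :=
  (groupsA.flatMap fun p => splitB (xs.filter fun bt => reverseB.get? bt == some p.1))

-- --- reverse-dict characterization (generic inductions, instantiated on the literal) ---

lemma inner_get?_not_mem (g bt : String) :
    ∀ (ts : List String) (d : PySem.Dict String String), bt ∉ ts →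
      (ts.foldl (fun d x => d.insert x g) d).get? bt = d.get? bt := by
  intro ts
  induction ts with
  | nil => intro d _; rfl
  | cons x ts ih =>
    intro d h
    simp only [List.mem_cons, not_or] at h
    simp only [List.foldl_cons]
    rw [ih _ h.2, PySem.Dict.get?_insert_of_ne _ _ h.1]

lemma inner_get?_mem (g bt : String) :
    ∀ (ts : List String) (d : PySem.Dict String String), bt ∈ ts →
      (ts.foldl (fun d x => d.insert x g) d).get? bt = some g := by
  intro ts
  induction ts with
  | nil => intro d h; simp at h
  | cons x ts ih =>
    intro d h
    simp only [List.foldl_cons]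
    by_cases hm : bt ∈ ts
    · exact ih _ hm
    · have hx : bt = x := by rcases List.mem_cons.mp h with h1 | h1; exact h1; exact absurd h1 hm
      rw [inner_get?_not_mem g bt ts _ hm, hx, PySem.Dict.get?_insert_self]

lemma outer_get?_not_mem (bt : String) :
    ∀ (gs : List (String × List String)) (d : PySem.Dict String String),
      (∀ p ∈ gs, bt ∉ p.2) →
      (gs.foldl (fun d p => p.2.foldl (fun d x => d.insert x p.1) d) d).get? bt = d.get? bt := by
  intro gs
  induction gs with
  | nil => intro d _; rfl
  | cons q gs ih =>
    intro d h
    simp only [List.foldl_cons]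
    rw [ih _ (fun p hp => h p (List.mem_cons_of_mem _ hp)),
      inner_get?_not_mem q.1 bt q.2 d (h q (List.mem_cons_self))]

lemma outer_get?_mem (bt : String) :
    ∀ (gs : List (String × List String)) (d : PySem.Dict String String)
      (p : String × List String), p ∈ gs → bt ∈ p.2 →
      gs.Pairwise (fun p q => ∀ x ∈ p.2, x ∉ q.2) →
      (gs.foldl (fun d p => p.2.foldl (fun d x => d.insert x p.1) d) d).get? bt = some p.1 := by
  intro gs
  induction gs with
  | nil => intro d p hp; simp at hp
  | cons q gs ih =>
    intro d p hp hbt hpw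
    rcases List.pairwise_cons.mp hpw with ⟨hq, hpw'⟩
    simp only [List.foldl_cons]
    rcases List.mem_cons.mp hp with h1 | h1
    · subst h1
      rw [outer_get?_not_mem bt gs _ (fun r hr => hq r hr bt hbt),
        inner_get?_mem p.1 bt p.2 d hbt]
    · exact ih _ p h1 hbt hpw'

lemma pairA : groupsA.Pairwise (fun p q => ∀ x ∈ p.2, x ∉ q.2) := by decide

lemma namesA_nodup : (groupsA.map Prod.fst).Nodup := by decide

-- reverseB.get? bt = some p.1 exactly characterizes membership in p's type list (p ∈ groupsA)
lemma mem_lemma : ∀ p ∈ groupsA, ∀ bt : String,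
    p.2.contains bt = (reverseB.get? bt == some p.1) := by
  intro p hp bt
  by_cases hbt : bt ∈ p.2
  · have hr : reverseB.get? bt = some p.1 :=
      outer_get?_mem bt groupsA PySem.Dict.empty p hp hbt pairA
    rw [hr]
    simp [hbt]
  · by_cases hq : ∃ q ∈ groupsA, bt ∈ q.2
    · obtain ⟨q, hqg, hqm⟩ := hq
      have hr : reverseB.get? bt = some q.1 :=
        outer_get?_mem bt groupsA PySem.Dict.empty q hqg hqm pairA
      rw [hr]
      have hne : q.1 ≠ p.1 := by
        intro he
        have := List.inj_on_of_nodup_map namesA_nodup hqg hp he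
        exact hbt (this ▸ hqm)
      simp [hbt, hne]
    · push Not at hq
      have hr : reverseB.get? bt = none :=
        (outer_get?_not_mem bt groupsA PySem.Dict.empty hq).trans rfl
      rw [hr]
      simp [hbt]

-- the reverse dict is defined exactly on the union of the group type lists
lemma names_of_get? (bt g : String) (h : reverseB.get? bt = some g) :
    ∃ p ∈ groupsA, p.1 = g := by
  by_cases hq : ∃ q ∈ groupsA, bt ∈ q.2
  · obtain ⟨q, hqg, hqm⟩ := hq
    have hr : reverseB.get? bt = some q.1 :=
      outer_get?_mem bt groupsA PySem.Dict.empty q hqg hqm pairA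
    rw [hr] at h
    exact ⟨q, hqg, Option.some.inj h⟩
  · push Not at hq
    have hr : reverseB.get? bt = none :=
      (outer_get?_not_mem bt groupsA PySem.Dict.empty hq).trans rfl
    rw [hr] at h
    exact absurd h (by simp)

-- --- slice / splitB basics ---

lemma slice_take2 (xs : List String) : PySem.List.slice xs none (some 2) = xs.take 2 := by
  rw [PySem.List.slice_to (xs := xs) (b := 2) (by norm_num)]; rfl

lemma slice_drop2 (xs : List String) : PySem.List.slice xs (some 2) none = xs.drop 2 := by
  rw [PySem.List.slice_from (xs := xs) (a := 2) (by norm_num)]; rfl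

lemma splitB_nil : splitB [] = [] := by rw [splitB]; rfl

lemma splitB_small (batch : List String) (h : ¬ batch.length > 3) (h2 : batch ≠ []) :
    splitB batch = [batch] := by
  rw [splitB]
  simp [h, h2]

lemma splitB_big (batch : List String) (h : batch.length > 3) :
    splitB batch = batch.take 2 :: splitB (batch.drop 2) := by
  rw [splitB]
  simp [h, slice_take2, slice_drop2]

-- --- A's per-group step reduces to splitB plus a set update ---

lemma step_split : ∀ (n : Nat) (batch : List String), batch.length ≤ n → batch ≠ [] →
    ∀ (b : List (List String)) (a : PySem.Set String),
    (if (whileSplitA b a batch).2.2.isEmpty then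
        ((whileSplitA b a batch).1, (whileSplitA b a batch).2.1)
      else ((whileSplitA b a batch).1 ++ [(whileSplitA b a batch).2.2],
        PySem.Set.update (whileSplitA b a batch).2.1 (whileSplitA b a batch).2.2))
      = (b ++ splitB batch, PySem.Set.update a batch) := by
  intro n
  induction n with
  | zero =>
    intro batch hlen hne
    cases batch with
    | nil => exact absurd rfl hne
    | cons x xs => simp at hlen
  | succ n ih =>
    intro batch hlen hne b a
    by_cases h : batch.length > 3
    · rw [whileSplitA]
      rw [dif_pos h]
      simp only [slice_take2, slice_drop2]
      have hlen2 : (batch.drop 2).length ≤ n := by simp; omega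
      have hne2 : batch.drop 2 ≠ [] := by
        intro hc; have := congrArg List.length hc; simp at this; omega
      rw [ih (batch.drop 2) hlen2 hne2 (b ++ [batch.take 2]) (PySem.Set.update a (batch.take 2))]
      rw [splitB_big batch h]
      rw [show PySem.Set.update (PySem.Set.update a (batch.take 2)) (batch.drop 2)
            = PySem.Set.update a batch from by
        rw [← PySem.Set.update_append, List.take_append_drop]]
      simp
    · rw [whileSplitA]
      rw [dif_neg h]
      have hne' : batch.isEmpty = false := by simp [hne]
      simp only [hne', Bool.false_eq_true, if_false]
      rw [splitB_small batch h hne]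

-- --- A's group loop ---

lemma loopA_eq (xs : List String) :
    ∀ (gs : List (String × List String)) (b : List (List String)) (a : PySem.Set String),
      (∀ p ∈ gs, p ∈ groupsA) →
      gs.Pairwise (fun p q => p.1 ≠ q.1) →
      (∀ bt ∈ xs, (∃ p ∈ gs, reverseB.get? bt = some p.1) → bt ∉ a) →
      (gs.foldl (stepA xs) (b, a)).1
          = b ++ (gs.flatMap fun p => splitB (xs.filter fun bt => reverseB.get? bt == some p.1))
      ∧ ∀ bt ∈ xs, (bt ∈ (gs.foldl (stepA xs) (b, a)).2
          ↔ bt ∈ a ∨ ∃ p ∈ gs, reverseB.get? bt = some p.1) := by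
  intro gs
  induction gs with
  | nil =>
    intro b a _ _ _
    simp
  | cons p gs ih =>
    intro b a hsub hpw hinv
    rcases List.pairwise_cons.mp hpw with ⟨hpq, hpw'⟩
    have hpA : p ∈ groupsA := hsub p List.mem_cons_self
    -- the head batch is the clean filter
    have hbatch : xs.filter (fun bt => p.2.contains bt && !(PySem.Set.contains a bt))
        = xs.filter (fun bt => reverseB.get? bt == some p.1) := by
      apply List.filter_congr
      intro bt hbt
      rw [mem_lemma p hpA bt]
      cases hg : (reverseB.get? bt == some p.1) with
      | false => simp
      | true =>
        have : bt ∉ a := hinv bt hbt ⟨p, List.mem_cons_self, by simpa using hg⟩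
        simp [PySem.Set.contains_eq_listContains, this]
    set F := xs.filter (fun bt => reverseB.get? bt == some p.1) with hF
    by_cases hFe : F = []
    · -- empty batch: the step is the identity
      have hstep : stepA xs (b, a) p = (b, a) := by
        simp only [stepA, hbatch, hFe]
        rfl
      have hno : ∀ bt ∈ xs, reverseB.get? bt ≠ some p.1 := by
        intro bt hbt hc
        have : bt ∈ F := by rw [hF, List.mem_filter]; exact ⟨hbt, by simp [hc]⟩
        simp [hFe] at this
      obtain ⟨ih1, ih2⟩ := ih b a (fun q hq => hsub q (List.mem_cons_of_mem _ hq)) hpw'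
        (fun bt hbt he => hinv bt hbt (he.imp fun q hq => ⟨List.mem_cons_of_mem _ hq.1, hq.2⟩))
      constructor
      · rw [List.foldl_cons, hstep, ih1]
        simp only [List.flatMap_cons]
        rw [← hF, hFe, splitB_nil]
        simp
      · intro bt hbt
        rw [List.foldl_cons, hstep, ih2 bt hbt]
        constructor
        · rintro (h1 | h1)
          · exact Or.inl h1
          · exact Or.inr (h1.imp fun q hq => ⟨List.mem_cons_of_mem _ hq.1, hq.2⟩)
        · rintro (h1 | ⟨q, hq1, hq2⟩)
          · exact Or.inl h1
          · rcases List.mem_cons.mp hq1 with he | he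
            · exact absurd (he ▸ hq2) (hno bt hbt)
            · exact Or.inr ⟨q, he, hq2⟩
    · -- non-empty batch
      have hstep : stepA xs (b, a) p = (b ++ splitB F, PySem.Set.update a F) := by
        simp only [stepA, hbatch]
        have : F.isEmpty = false := by simp [hFe]
        simp only [this, Bool.false_eq_true, if_false]
        exact step_split F.length F le_rfl hFe b a
      have hmemF : ∀ bt, bt ∈ F ↔ bt ∈ xs ∧ reverseB.get? bt = some p.1 := by
        intro bt; rw [hF, List.mem_filter]; simp
      obtain ⟨ih1, ih2⟩ := ih (b ++ splitB F) (PySem.Set.update a F)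
        (fun q hq => hsub q (List.mem_cons_of_mem _ hq)) hpw'
        (by
          intro bt hbt he
          obtain ⟨q, hq1, hq2⟩ := he
          rw [PySem.Set.mem_update]
          rintro (hc | hc)
          · exact hinv bt hbt ⟨q, List.mem_cons_of_mem _ hq1, hq2⟩ hc
          · have := ((hmemF bt).mp hc).2
            exact hpq q hq1 (by rw [this] at hq2; exact Option.some.injEq _ _ ▸ hq2))
      constructor
      · rw [List.foldl_cons, hstep, ih1]
        simp only [List.flatMap_cons]
        rw [← hF]
        simp
      · intro bt hbt
        rw [List.foldl_cons, hstep, ih2 bt hbt, PySem.Set.mem_update, hmemF bt]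
        constructor
        · rintro ((h1 | h1) | ⟨q, hq1, hq2⟩)
          · exact Or.inl h1
          · exact Or.inr ⟨p, List.mem_cons_self, h1.2⟩
          · exact Or.inr ⟨q, List.mem_cons_of_mem _ hq1, hq2⟩
        · rintro (h1 | ⟨q, hq1, hq2⟩)
          · exact Or.inl (Or.inl h1)
          · rcases List.mem_cons.mp hq1 with he | he
            · exact Or.inl (Or.inr ⟨hbt, he ▸ hq2⟩)
            · exact Or.inr ⟨q, he, hq2⟩

-- A's full value is the canonical one
lemma A_eq_canon (xs : List String) :
    create_block_batches_py xs
      = appendPairs (canonReverse xs) (xs.filter fun bt => (reverseB.get? bt).isNone) := by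
  have hpw : groupsA.Pairwise (fun p q => p.1 ≠ q.1) := by decide
  obtain ⟨h1, h2⟩ := loopA_eq xs groupsA [] PySem.Set.empty (fun p hp => hp) hpw
    (by intro bt _ _ hc; simp [PySem.Set.empty] at hc)
  have hA : create_block_batches_py xs
      = appendPairs (groupsA.foldl (stepA xs) ([], PySem.Set.empty)).1
          (xs.filter fun bt =>
            !(PySem.Set.contains (groupsA.foldl (stepA xs) ([], PySem.Set.empty)).2 bt)) := rfl
  rw [hA, h1]
  simp only [PySem.Set.empty] at h2 ⊢
  have hrem : (xs.filter fun bt =>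
      !(PySem.Set.contains (groupsA.foldl (stepA xs) ([], ([] : List String))).2 bt))
      = xs.filter fun bt => (reverseB.get? bt).isNone := by
    apply List.filter_congr
    intro bt hbt
    have hiff : bt ∈ (groupsA.foldl (stepA xs) ([], ([] : List String))).2
        ↔ ∃ p ∈ groupsA, reverseB.get? bt = some p.1 :=
      (h2 bt hbt).trans (by simp)
    rw [PySem.Set.contains_eq_listContains, List.contains_eq_mem]
    cases hg : reverseB.get? bt with
    | none =>
      have hnm : bt ∉ (groupsA.foldl (stepA xs) ([], ([] : List String))).2 := by
        rw [hiff]; rintro ⟨q, _, hq⟩; rw [hg] at hq; simp at hq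
      simp [hnm]
    | some g =>
      obtain ⟨p, hpg, hpe⟩ := names_of_get? bt g hg
      have hm : bt ∈ (groupsA.foldl (stepA xs) ([], ([] : List String))).2 := by
        rw [hiff]; exact ⟨p, hpg, by rw [hg, hpe]⟩
      simp [hm]
  rw [hrem]
  simp [canonReverse]

-- --- B side ---

lemma bFold_fst (xs : List String) :
    ∀ (d : PySem.Dict String (List String)) (rem : List String) (g : String),
      ((xs.foldl bstep (d, rem)).1).getD g []
        = d.getD g [] ++ xs.filter (fun bt => reverseB.get? bt == some g) := by
  induction xs with
  | nil => intro d rem g; simp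
  | cons bt xs ih =>
    intro d rem g
    simp only [List.foldl_cons, List.filter_cons]
    cases hg : reverseB.get? bt with
    | none =>
      simp only [bstep, hg]
      rw [ih d (rem ++ [bt]) g]
      simp
    | some g' =>
      simp only [bstep, hg]
      rw [ih (d.modify g' [] (· ++ [bt])) rem g, PySem.Dict.getD_modify]
      by_cases he : g = g'
      · subst he; simp
      · have : (some g' == some g) = false := by simp [Ne.symm he]
        simp [he, this]

lemma bFold_snd (xs : List String) :
    ∀ (d : PySem.Dict String (List String)) (rem : List String),
      (xs.foldl bstep (d, rem)).2 = rem ++ xs.filter (fun bt => (reverseB.get? bt).isNone) := by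
  induction xs with
  | nil => intro d rem; simp
  | cons bt xs ih =>
    intro d rem
    simp only [List.foldl_cons, List.filter_cons]
    cases hg : reverseB.get? bt with
    | none => simp only [bstep, hg]; rw [ih]; simp
    | some g' => simp only [bstep, hg]; rw [ih]; simp

lemma buckets0_getD :
    ∀ (gs : List (String × List String)) (d : PySem.Dict String (List String)) (g : String),
      d.getD g [] = [] → (gs.foldl (fun d p => d.insert p.1 []) d).getD g [] = [] := by
  intro gs
  induction gs with
  | nil => intro d g h; exact h
  | cons p gs ih =>
    intro d g h
    simp only [List.foldl_cons]
    apply ih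
    rw [PySem.Dict.getD_insert]
    split_ifs <;> simp [h]

lemma B_eq_canon (xs : List String) :
    create_block_batches_py_alt xs
      = appendPairs (canonReverse xs) (xs.filter fun bt => (reverseB.get? bt).isNone) := by
  have hB : create_block_batches_py_alt xs
      = appendPairs
          (groupsB.foldl (fun acc p =>
              if ((xs.foldl bstep
                    (groupsB.foldl (fun d p => d.insert p.1 []) PySem.Dict.empty, [])).1.getD p.1 []).isEmpty
              then acc
              else acc ++ splitB ((xs.foldl bstep
                    (groupsB.foldl (fun d p => d.insert p.1 []) PySem.Dict.empty, [])).1.getD p.1 [])) [])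
          ((xs.foldl bstep (groupsB.foldl (fun d p => d.insert p.1 []) PySem.Dict.empty, [])).2) := rfl
  have hb0 : ∀ g : String,
      (groupsB.foldl (fun d p => d.insert p.1 []) PySem.Dict.empty).getD g [] = [] :=
    fun g => buckets0_getD groupsB PySem.Dict.empty g rfl
  have hbucket : ∀ g : String,
      (xs.foldl bstep (groupsB.foldl (fun d p => d.insert p.1 []) PySem.Dict.empty, [])).1.getD g []
        = xs.filter (fun bt => reverseB.get? bt == some g) := by
    intro g
    rw [bFold_fst xs _ [] g, hb0 g, List.nil_append]
  have hrem : (xs.foldl bstep (groupsB.foldl (fun d p => d.insert p.1 []) PySem.Dict.empty, [])).2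
      = xs.filter (fun bt => (reverseB.get? bt).isNone) := by
    rw [bFold_snd xs _ [], List.nil_append]
  rw [hB, hrem]
  congr 1
  rw [PySem.List.foldl_congr_mem groupsB _
    (fun acc p => acc ++ splitB (xs.filter fun bt => reverseB.get? bt == some p.1)) []
    (by
      intro acc p hp
      rw [hbucket p.1]
      by_cases he : xs.filter (fun bt => reverseB.get? bt == some p.1) = []
      · simp [he, splitB_nil]
      · simp [List.isEmpty_iff, he])]
  rw [PySem.List.foldl_append_eq_flatMap]
  simp only [canonReverse, List.nil_append]
  rfl

-- ===== VERDICT (by name: the statement is the Claim_ definition above) =====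
theorem create_block_batches_py_spec : Claim_equal_create_block_batches_py := by
  intro xs _
  unfold Spec_create_block_batches_py
  rw [A_eq_canon, B_eq_canon]
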